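-- pv_equiv track=rewrite | github.com/mizutkoij/baseball-ai-media | archive/src_archive/kbo_integrated_sabermetrics_system.py | _analyze_calculation_needs
-- ===== SOURCE A (Python) =====
-- def _analyze_calculation_needs(target_metrics):
--     """計算ニーズ分析"""
--     calculation_needs = {
--         'simple_formulas': [],
--         'complex_algorithms': [],
--         'park_adjustments': [],
--         'league_constants_required': []
--     }
--
--     simple_formulas = ['OPS', 'ISO', 'BABIP']
--     complex_algorithms = ['WAR', 'wRC+', 'FIP']
--     park_adjustments = ['wRC+', 'ERA+']
--     constants_required = ['wOBA', 'FIP', 'wRC+']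
--
--     for metric in target_metrics:
--         if metric in simple_formulas:
--             calculation_needs['simple_formulas'].append(metric)
--         if metric in complex_algorithms:
--             calculation_needs['complex_algorithms'].append(metric)
--         if metric in park_adjustments:
--             calculation_needs['park_adjustments'].append(metric)
--         if metric in constants_required:
--             calculation_needs['league_constants_required'].append(metric)
--
--     return calculation_needs
-- ===== SOURCE B (Python) =====
-- # Inverted index: a metric -> buckets table drives a flatten-then-group pipeline,
-- # instead of A's stateful loop with four membership tests.
-- _DISPATCH = {
--     'OPS': ('simple_formulas',),
--     'ISO': ('simple_formulas',),
--     'BABIP': ('simple_formulas',),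
--     'WAR': ('complex_algorithms',),
--     'FIP': ('complex_algorithms', 'league_constants_required'),
--     'wRC+': ('complex_algorithms', 'park_adjustments', 'league_constants_required'),
--     'ERA+': ('park_adjustments',),
--     'wOBA': ('league_constants_required',),
-- }
--
-- def _analyze_calculation_needs(target_metrics):
--     keyed = [(bucket, m) for m in target_metrics for bucket in _DISPATCH.get(m, ())]
--     return {bucket: [m for b, m in keyed if b == bucket]
--             for bucket in ('simple_formulas', 'complex_algorithms',
--                            'park_adjustments', 'league_constants_required')}
-- ===== Notes on version B (the rewrite author's own statement) =====
-- stated objective: alternative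
-- what changed: Replaced the stateful loop with four membership tests per element by an inverted metric-to-buckets dispatch table: the input is flattened into (bucket, metric) pairs via one dict lookup per element and the four buckets are then grouped out of that pair stream.
import Mathlib
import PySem

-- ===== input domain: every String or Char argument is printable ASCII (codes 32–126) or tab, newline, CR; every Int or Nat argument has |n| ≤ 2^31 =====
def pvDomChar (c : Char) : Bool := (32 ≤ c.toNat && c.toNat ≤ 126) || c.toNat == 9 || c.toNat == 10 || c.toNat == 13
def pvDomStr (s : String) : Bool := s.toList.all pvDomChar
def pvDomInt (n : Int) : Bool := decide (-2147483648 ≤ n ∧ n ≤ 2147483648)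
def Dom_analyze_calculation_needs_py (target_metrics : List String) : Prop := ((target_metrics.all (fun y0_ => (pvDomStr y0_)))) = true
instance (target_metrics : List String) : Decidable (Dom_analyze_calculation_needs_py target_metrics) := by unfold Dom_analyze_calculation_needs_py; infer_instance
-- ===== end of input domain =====

-- B: an inverted metric→buckets dispatch table drives a flatten-then-group pipeline instead of A's single stateful loop with four membership tests (alternative decomposition: one dict lookup per element instead of four membership scans).


-- ===== PORT A =====
-- Port of A: one loop over target_metrics threading the four bucket lists
-- (the dict's fixed literal keys) as state; the dict is assembled at the end.
def analyzeA_loop (target_metrics : List String)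
    (s c p l : List String) : List String × List String × List String × List String :=
  match target_metrics with
  | [] => (s, c, p, l)
  | metric :: rest =>
      let s := if metric ∈ ["OPS", "ISO", "BABIP"] then s ++ [metric] else s
      let c := if metric ∈ ["WAR", "wRC+", "FIP"] then c ++ [metric] else c
      let p := if metric ∈ ["wRC+", "ERA+"] then p ++ [metric] else p
      let l := if metric ∈ ["wOBA", "FIP", "wRC+"] then l ++ [metric] else l
      analyzeA_loop rest s c p l

def analyze_calculation_needs_py (target_metrics : List String) : List (String × List String) :=
  match analyzeA_loop target_metrics [] [] [] [] with
  | (s, c, p, l) =>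
      [("simple_formulas", s), ("complex_algorithms", c),
       ("park_adjustments", p), ("league_constants_required", l)]

-- ===== PORT B =====
-- Port of B: the module-level dispatch dict (metric → tuple of bucket names),
-- a flatten into (bucket, metric) pairs, then one filtered projection per bucket.
def pvDispatch : PySem.Dict String (List String) :=
  PySem.Dict.mk
    [("OPS", ["simple_formulas"]),
     ("ISO", ["simple_formulas"]),
     ("BABIP", ["simple_formulas"]),
     ("WAR", ["complex_algorithms"]),
     ("FIP", ["complex_algorithms", "league_constants_required"]),
     ("wRC+", ["complex_algorithms", "park_adjustments", "league_constants_required"]),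
     ("ERA+", ["park_adjustments"]),
     ("wOBA", ["league_constants_required"])]

def analyze_calculation_needs_py_alt (target_metrics : List String) : List (String × List String) :=
  let keyed := target_metrics.flatMap (fun m => (pvDispatch.getD m []).map (fun bucket => (bucket, m)))
  (["simple_formulas", "complex_algorithms", "park_adjustments", "league_constants_required"]).map
    (fun bucket => (bucket, (keyed.filter (fun bm => bm.1 == bucket)).map (fun bm => bm.2)))

-- ===== PRECONDITION & SPEC =====
def Spec_analyze_calculation_needs_py (target_metrics : List String) (out : List (String × List String)) : Prop := out = analyze_calculation_needs_py_alt target_metrics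
instance (target_metrics : List String) (out : List (String × List String)) : Decidable (Spec_analyze_calculation_needs_py target_metrics out) := by unfold Spec_analyze_calculation_needs_py; infer_instance

-- ===== CLAIM =====
def Claim_equal_analyze_calculation_needs_py : Prop := ∀ (target_metrics : List String), Dom_analyze_calculation_needs_py target_metrics → Spec_analyze_calculation_needs_py target_metrics (analyze_calculation_needs_py target_metrics)

-- ===== LEMMAS AND PROOFS =====
-- A's loop, characterised: each bucket is the membership filter of the input.
theorem analyzeA_loop_eq (xs : List String) (s c p l : List String) :
    analyzeA_loop xs s c p l =
      (s ++ xs.filter (fun m => decide (m ∈ ["OPS", "ISO", "BABIP"])),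
       c ++ xs.filter (fun m => decide (m ∈ ["WAR", "wRC+", "FIP"])),
       p ++ xs.filter (fun m => decide (m ∈ ["wRC+", "ERA+"])),
       l ++ xs.filter (fun m => decide (m ∈ ["wOBA", "FIP", "wRC+"]))) := by
  induction xs generalizing s c p l with
  | nil => simp [analyzeA_loop]
  | cons x xs ih =>
      simp only [analyzeA_loop, ih, List.filter_cons]
      refine Prod.ext ?_ (Prod.ext ?_ (Prod.ext ?_ ?_)) <;>
        · simp only [decide_eq_true_eq]
          split_ifs <;> simp

-- One metric's contribution to one bucket of B's pipeline is exactly A's membership test.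
theorem pvDispatch_bucket (m bucket : String) (members : List String)
    (hb : (bucket, members) ∈ [("simple_formulas", ["OPS", "ISO", "BABIP"]),
                               ("complex_algorithms", ["WAR", "wRC+", "FIP"]),
                               ("park_adjustments", ["wRC+", "ERA+"]),
                               ("league_constants_required", ["wOBA", "FIP", "wRC+"])]) :
    ((((pvDispatch.getD m []).map (fun b => (b, m))).filter (fun bm => bm.1 == bucket)).map
        (fun bm => bm.2)) =
      if m ∈ members then [m] else [] := by
  by_cases h1 : m = "OPS"
  · subst h1; fin_cases hb <;> decide
  by_cases h2 : m = "ISO"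
  · subst h2; fin_cases hb <;> decide
  by_cases h3 : m = "BABIP"
  · subst h3; fin_cases hb <;> decide
  by_cases h4 : m = "WAR"
  · subst h4; fin_cases hb <;> decide
  by_cases h5 : m = "FIP"
  · subst h5; fin_cases hb <;> decide
  by_cases h6 : m = "wRC+"
  · subst h6; fin_cases hb <;> decide
  by_cases h7 : m = "ERA+"
  · subst h7; fin_cases hb <;> decide
  by_cases h8 : m = "wOBA"
  · subst h8; fin_cases hb <;> decide
  · have hd : pvDispatch.getD m [] = [] := by
      simp only [pvDispatch, PySem.Dict.getD_eq_get?_getD, PySem.Dict.get?_mk_cons, beq_iff_eq]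
      rw [if_neg (fun e => h1 e.symm), if_neg (fun e => h2 e.symm), if_neg (fun e => h3 e.symm),
          if_neg (fun e => h4 e.symm), if_neg (fun e => h5 e.symm), if_neg (fun e => h6 e.symm),
          if_neg (fun e => h7 e.symm), if_neg (fun e => h8 e.symm)]
      rfl
    rw [hd]
    fin_cases hb <;> simp_all

-- B's bucket list equals the membership filter over the whole input.
theorem alt_bucket (xs : List String) (bucket : String) (members : List String)
    (hb : (bucket, members) ∈ [("simple_formulas", ["OPS", "ISO", "BABIP"]),
                               ("complex_algorithms", ["WAR", "wRC+", "FIP"]),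
                               ("park_adjustments", ["wRC+", "ERA+"]),
                               ("league_constants_required", ["wOBA", "FIP", "wRC+"])]) :
    (((xs.flatMap (fun m => (pvDispatch.getD m []).map (fun b => (b, m)))).filter
        (fun bm => bm.1 == bucket)).map (fun bm => bm.2)) =
      xs.filter (fun m => decide (m ∈ members)) := by
  induction xs with
  | nil => simp
  | cons x xs ih =>
      simp only [List.flatMap_cons, List.filter_append, List.map_append, ih, List.filter_cons]
      rw [pvDispatch_bucket x bucket members hb]
      by_cases h : x ∈ members <;> simp [h]

theorem analyze_calculation_needs_py_spec : Claim_equal_analyze_calculation_needs_py := by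
  intro xs _
  unfold Spec_analyze_calculation_needs_py analyze_calculation_needs_py analyze_calculation_needs_py_alt
  rw [analyzeA_loop_eq]
  simp only [List.map_cons, List.map_nil, List.nil_append]
  rw [alt_bucket xs "simple_formulas" ["OPS", "ISO", "BABIP"] (by decide),
      alt_bucket xs "complex_algorithms" ["WAR", "wRC+", "FIP"] (by decide),
      alt_bucket xs "park_adjustments" ["wRC+", "ERA+"] (by decide),
      alt_bucket xs "league_constants_required" ["wOBA", "FIP", "wRC+"] (by decide)]
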